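-- pv_equiv track=rewrite | github.com/justincasali/Python-Examples | Algorithms/freeTime.py | max_logged_in
-- ===== SOURCE A (Python) =====
-- def max_logged_in(interval_lst, T):
--
--     timeline = [] # array containing elements with time value and login(+1) / logout(-1) data
--
--     for i in interval_lst:
--         timeline.append((i[0], +1))
--         timeline.append((i[1], -1))
--
--     timeline.sort() # sorts in Theta(n*log(n)) time
--
--     users = 0 # current number of users
--     max_n = 0 # max_logged_in_num
--     max_t = 0 # max_logged_in_time
--
--     for i in timeline:
--
--         if (i[0] > T): # exit look if current time is greater than T
--             break
--
--         users = users + i[1]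
--
--         if (users > max_n):
--             max_n = users
--             max_t = i[0]
--
--     return (max_n, max_t)
-- ===== SOURCE B (Python) =====
-- def max_logged_in(interval_lst, T):
--     logins = sorted(i[0] for i in interval_lst)
--     logouts = sorted(i[1] for i in interval_lst)
--     n = len(interval_lst)
--     users = max_n = max_t = 0
--     i = j = 0
--     while i < n or j < n:
--         if i < n and (j >= n or logins[i] < logouts[j]):
--             t = logins[i]; i += 1; users += 1
--         else:
--             t = logouts[j]; j += 1; users -= 1
--         if t > T:
--             break
--         if users > max_n:
--             max_n = users; max_t = t
--     return (max_n, max_t)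
-- ===== Notes on version B (the rewrite author's own statement) =====
-- stated objective: alternative
-- what changed: Instead of building one list of (time, +/-1) event tuples and sorting it lexicographically, B sorts the login times and the logout times as two plain int lists and sweeps them with a two-pointer merge (logouts first on ties), updating the running count and maximum inline.
import Mathlib
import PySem

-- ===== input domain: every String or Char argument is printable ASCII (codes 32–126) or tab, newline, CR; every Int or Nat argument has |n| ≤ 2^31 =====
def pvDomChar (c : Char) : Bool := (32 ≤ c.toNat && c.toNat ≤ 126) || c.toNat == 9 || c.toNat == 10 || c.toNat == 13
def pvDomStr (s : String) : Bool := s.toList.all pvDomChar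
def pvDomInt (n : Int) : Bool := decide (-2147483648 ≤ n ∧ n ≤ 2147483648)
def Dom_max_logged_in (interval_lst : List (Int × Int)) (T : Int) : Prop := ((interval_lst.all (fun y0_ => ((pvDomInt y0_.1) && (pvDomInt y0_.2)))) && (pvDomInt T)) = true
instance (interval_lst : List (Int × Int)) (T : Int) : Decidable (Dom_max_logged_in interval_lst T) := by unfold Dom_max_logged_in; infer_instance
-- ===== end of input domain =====

-- B replaces A's single sort of (time, ±1) event tuples by two independent int sorts
-- (login times, logout times) merged with two pointers while sweeping; same result, a
-- different decomposition of the sweep ('alternative').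

-- ===== PORT A =====
-- the 'for i in timeline: …' loop with its break, users/max_n/max_t accumulators
def sweepA (T : Int) : List (Int × Int) → Int → Int → Int → Int × Int
  | [], _, max_n, max_t => (max_n, max_t)
  | i :: rest, users, max_n, max_t =>
    if i.1 > T then (max_n, max_t)
    else
      let users' := users + i.2
      if users' > max_n then sweepA T rest users' users' i.1
      else sweepA T rest users' max_n max_t

def max_logged_in (interval_lst : List (Int × Int)) (T : Int) : Int × Int :=
  let timeline := interval_lst.foldl (fun acc i => (acc ++ [(i.1, 1)]) ++ [(i.2, -1)]) []
  let timeline := PySem.List.sorted2 timeline Prod.fst Prod.snd  -- timeline.sort(): tuple = lexicographic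
  sweepA T timeline 0 0 0

-- ===== PORT B =====
-- the two-pointer while loop: next event is the smaller head, logouts first on ties
def mergeSweep (T : Int) : List Int → List Int → Int → Int → Int → Int × Int
  | [], [], _, max_n, max_t => (max_n, max_t)
  | s :: ss, [], users, max_n, max_t =>
    if s > T then (max_n, max_t)
    else
      let users' := users + 1
      if users' > max_n then mergeSweep T ss [] users' users' s
      else mergeSweep T ss [] users' max_n max_t
  | [], e :: es, users, max_n, max_t =>
    if e > T then (max_n, max_t)
    else
      let users' := users - 1
      if users' > max_n then mergeSweep T [] es users' users' e
      else mergeSweep T [] es users' max_n max_t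
  | s :: ss, e :: es, users, max_n, max_t =>
    if s < e then
      if s > T then (max_n, max_t)
      else
        let users' := users + 1
        if users' > max_n then mergeSweep T ss (e :: es) users' users' s
        else mergeSweep T ss (e :: es) users' max_n max_t
    else
      if e > T then (max_n, max_t)
      else
        let users' := users - 1
        if users' > max_n then mergeSweep T (s :: ss) es users' users' e
        else mergeSweep T (s :: ss) es users' max_n max_t
  termination_by ss es _ _ _ => ss.length + es.length

def max_logged_in_alt (interval_lst : List (Int × Int)) (T : Int) : Int × Int :=
  let logins := PySem.List.sorted (interval_lst.map Prod.fst) (fun x => x)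
  let logouts := PySem.List.sorted (interval_lst.map Prod.snd) (fun x => x)
  mergeSweep T logins logouts 0 0 0

-- ===== PRECONDITION & SPEC =====
def Spec_max_logged_in (interval_lst : List (Int × Int)) (T : Int) (out : Int × Int) : Prop := out = max_logged_in_alt interval_lst T
instance (interval_lst : List (Int × Int)) (T : Int) (out : Int × Int) : Decidable (Spec_max_logged_in interval_lst T out) := by unfold Spec_max_logged_in; infer_instance

-- ===== CLAIM (what is proved, stated in full; the proofs are below) =====
def Claim_equal_max_logged_in : Prop := ∀ (interval_lst : List (Int × Int)) (T : Int), Dom_max_logged_in interval_lst T → Spec_max_logged_in interval_lst T (max_logged_in interval_lst T)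

-- ===== LEMMAS AND PROOFS =====

-- the pure two-pointer merge: the event list B's sweep walks through
def mergeEvents : List Int → List Int → List (Int × Int)
  | [], es => es.map (fun e => (e, -1))
  | s :: ss, [] => (s, 1) :: mergeEvents ss []
  | s :: ss, e :: es =>
    if s < e then (s, 1) :: mergeEvents ss (e :: es)
    else (e, -1) :: mergeEvents (s :: ss) es
  termination_by ss es => ss.length + es.length

-- lexicographic ≤ on events, i.e. Python's tuple order
def lexle (a b : Int × Int) : Prop := a.1 < b.1 ∨ (a.1 = b.1 ∧ a.2 ≤ b.2)

-- Python's tuple < as a Bool, matching sorted2's comparator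
def beforeLex (a b : Int × Int) : Bool := decide (a.1 < b.1) || (!decide (b.1 < a.1) && decide (a.2 < b.2))

theorem lexle_trans {a b c : Int × Int} (h1 : lexle a b) (h2 : lexle b c) : lexle a c := by
  rcases a with ⟨a1, a2⟩; rcases b with ⟨b1, b2⟩; rcases c with ⟨c1, c2⟩
  simp only [lexle] at *; omega

theorem lexle_antisymm {a b : Int × Int} (h1 : lexle a b) (h2 : lexle b a) : a = b := by
  rcases a with ⟨a1, a2⟩; rcases b with ⟨b1, b2⟩
  simp only [lexle, Prod.mk.injEq] at *; omega

theorem beforeLex_true {a b : Int × Int} (h : beforeLex a b = true) : lexle a b := by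
  rcases a with ⟨a1, a2⟩; rcases b with ⟨b1, b2⟩
  simp only [beforeLex, Bool.or_eq_true, Bool.and_eq_true, Bool.not_eq_true',
    decide_eq_true_eq, decide_eq_false_iff_not] at h
  simp only [lexle]; omega

theorem beforeLex_false {a b : Int × Int} (h : beforeLex a b = false) : lexle b a := by
  rcases a with ⟨a1, a2⟩; rcases b with ⟨b1, b2⟩
  simp only [beforeLex, Bool.or_eq_false_iff, Bool.and_eq_false_iff, Bool.not_eq_false',
    decide_eq_true_eq, decide_eq_false_iff_not] at h
  simp only [lexle]; omega

theorem insertBy_pairwise (x : Int × Int) (l : List (Int × Int)) (h : l.Pairwise lexle) :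
    (PySem.List.insertBy beforeLex x l).Pairwise lexle := by
  induction l with
  | nil => simp [PySem.List.insertBy]
  | cons y ys ih =>
    rcases h with _ | ⟨hy, hys⟩
    by_cases hb : beforeLex x y = true
    · simp only [PySem.List.insertBy, hb, if_true]
      refine List.Pairwise.cons ?_ (List.Pairwise.cons hy hys)
      intro z hz
      rcases List.mem_cons.mp hz with rfl | hz
      · exact beforeLex_true hb
      · exact lexle_trans (beforeLex_true hb) (hy z hz)
    · rw [Bool.not_eq_true] at hb
      simp only [PySem.List.insertBy, hb, Bool.false_eq_true, if_false]
      refine List.Pairwise.cons ?_ (ih hys)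
      intro z hz
      rcases (PySem.List.mem_insertBy _ _ _ _).mp hz with rfl | hz
      · exact beforeLex_false hb
      · exact hy z hz

theorem foldl_insertBy_pairwise (xs : List (Int × Int)) (acc : List (Int × Int))
    (h : acc.Pairwise lexle) :
    (xs.foldl (fun acc x => PySem.List.insertBy beforeLex x acc) acc).Pairwise lexle := by
  induction xs generalizing acc with
  | nil => exact h
  | cons x xs ih => exact ih _ (insertBy_pairwise x acc h)

theorem sorted2_eq_foldl (xs : List (Int × Int)) :
    PySem.List.sorted2 xs Prod.fst Prod.snd =
      xs.foldl (fun acc x => PySem.List.insertBy beforeLex x acc) [] := rfl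

theorem mergeEvents_perm (ss es : List Int) :
    (mergeEvents ss es).Perm (ss.map (fun s => (s, (1:Int))) ++ es.map (fun e => (e, (-1:Int)))) := by
  fun_induction mergeEvents ss es with
  | case1 es => simp
  | case2 s ss ih => simpa using List.Perm.cons (s, (1:Int)) ih
  | case3 s ss e es hlt ih => simpa using List.Perm.cons (s, (1:Int)) ih
  | case4 s ss e es hlt ih => exact (List.Perm.cons _ ih).trans List.perm_middle.symm

theorem mem_mergeEvents {x : Int × Int} {ss es : List Int} (h : x ∈ mergeEvents ss es) :
    (∃ s ∈ ss, x = (s, 1)) ∨ (∃ e ∈ es, x = (e, -1)) := by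
  have := (mergeEvents_perm ss es).mem_iff.mp h
  simp only [List.mem_append, List.mem_map] at this
  rcases this with ⟨s, hs, rfl⟩ | ⟨e, he, rfl⟩
  · exact Or.inl ⟨s, hs, rfl⟩
  · exact Or.inr ⟨e, he, rfl⟩

theorem mergeEvents_pairwise (ss es : List Int)
    (hs : ss.Pairwise (· ≤ ·)) (he : es.Pairwise (· ≤ ·)) :
    (mergeEvents ss es).Pairwise lexle := by
  fun_induction mergeEvents ss es with
  | case1 es =>
    exact he.map _ (fun a b hab => Or.elim (lt_or_eq_of_le hab)
      (fun h => Or.inl h) (fun h => Or.inr ⟨h, le_refl _⟩))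
  | case2 s ss ih =>
    rcases hs with _ | ⟨hshead, hstail⟩
    refine List.Pairwise.cons ?_ (ih hstail he)
    intro z hz
    rcases mem_mergeEvents hz with ⟨s1, hs1, rfl⟩ | ⟨e1, he1, rfl⟩
    · rcases lt_or_eq_of_le (hshead s1 hs1) with h | h
      · exact Or.inl h
      · exact Or.inr ⟨h, le_refl _⟩
    · simp at he1
  | case3 s ss e es hlt ih =>
    rcases hs with _ | ⟨hshead, hstail⟩
    refine List.Pairwise.cons ?_ (ih hstail he)
    intro z hz
    rcases mem_mergeEvents hz with ⟨s1, hs1, rfl⟩ | ⟨e1, he1, rfl⟩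
    · rcases lt_or_eq_of_le (hshead s1 hs1) with h | h
      · exact Or.inl h
      · exact Or.inr ⟨h, le_refl _⟩
    · have : e ≤ e1 := by
        rcases List.mem_cons.mp he1 with rfl | he1
        · exact le_refl _
        · exact (List.pairwise_cons.mp he).1 e1 he1
      exact Or.inl (lt_of_lt_of_le hlt this)
  | case4 s ss e es hlt ih =>
    rcases he with _ | ⟨hehead, hetail⟩
    refine List.Pairwise.cons ?_ (ih hs hetail)
    intro z hz
    rcases mem_mergeEvents hz with ⟨s1, hs1, rfl⟩ | ⟨e1, he1, rfl⟩
    · have hes : e ≤ s1 := by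
        rcases List.mem_cons.mp hs1 with rfl | hs1
        · omega
        · have := (List.pairwise_cons.mp hs).1 s1 hs1
          omega
      rcases lt_or_eq_of_le hes with h | h
      · exact Or.inl h
      · exact Or.inr ⟨h, by norm_num⟩
    · rcases lt_or_eq_of_le (hehead e1 he1) with h | h
      · exact Or.inl h
      · exact Or.inr ⟨h, le_refl _⟩

theorem mergeSweep_eq_sweepA (T : Int) (ss es : List Int) (u mn mt : Int) :
    mergeSweep T ss es u mn mt = sweepA T (mergeEvents ss es) u mn mt := by
  fun_induction mergeSweep T ss es u mn mt <;>
    simp_all [mergeEvents, sweepA] <;>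
    first
      | rfl
      | (split_ifs <;> first | rfl | omega | (congr 1 <;> omega))
      | (rw [if_neg (by omega)]; simp_all [sweepA]; done)
      | (rw [if_neg (by omega), sweepA, if_neg (by omega)]; dsimp only; split_ifs <;> first | rfl | omega)

theorem timeline_flatMap (l : List (Int × Int)) :
    l.foldl (fun acc i => (acc ++ [(i.1, (1:Int))]) ++ [(i.2, (-1:Int))]) [] =
      l.flatMap (fun i => [(i.1, (1:Int)), (i.2, (-1:Int))]) := by
  rw [PySem.List.foldl_congr_mem l _ (fun acc i => acc ++ [(i.1, (1:Int)), (i.2, (-1:Int))]) []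
    (by intro acc x _; simp)]
  simpa using PySem.List.foldl_append_eq_flatMap (fun i => [(i.1, (1:Int)), (i.2, (-1:Int))]) l []

theorem timeline_perm (l : List (Int × Int)) :
    (l.foldl (fun acc i => (acc ++ [(i.1, (1:Int))]) ++ [(i.2, (-1:Int))]) []).Perm
      ((l.map Prod.fst).map (fun s => (s, (1:Int))) ++ (l.map Prod.snd).map (fun e => (e, (-1:Int)))) := by
  rw [timeline_flatMap]
  induction l with
  | nil => simp
  | cons i l ih =>
    simp only [List.flatMap_cons, List.map_cons, List.cons_append]
    refine List.Perm.cons _ ?_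
    exact (List.Perm.cons _ ih).trans List.perm_middle.symm

theorem sorted2_eq_mergeEvents (l : List (Int × Int)) :
    PySem.List.sorted2 (l.foldl (fun acc i => (acc ++ [(i.1, (1:Int))]) ++ [(i.2, (-1:Int))]) []) Prod.fst Prod.snd =
      mergeEvents (PySem.List.sorted (l.map Prod.fst) (fun x => x))
                  (PySem.List.sorted (l.map Prod.snd) (fun x => x)) := by
  set timeline := l.foldl (fun acc i => (acc ++ [(i.1, (1:Int))]) ++ [(i.2, (-1:Int))]) [] with htl
  have hperm : (PySem.List.sorted2 timeline Prod.fst Prod.snd).Perm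
      (mergeEvents (PySem.List.sorted (l.map Prod.fst) (fun x => x))
                   (PySem.List.sorted (l.map Prod.snd) (fun x => x))) := by
    refine ((PySem.List.sorted2_perm timeline Prod.fst Prod.snd false).trans
      ((timeline_perm l).trans ?_)).trans (mergeEvents_perm _ _).symm
    exact List.Perm.append
      ((PySem.List.sorted_perm (l.map Prod.fst) (fun x => x) false).symm.map _)
      ((PySem.List.sorted_perm (l.map Prod.snd) (fun x => x) false).symm.map _)
  have h1 : (PySem.List.sorted2 timeline Prod.fst Prod.snd).Pairwise lexle := by
    rw [sorted2_eq_foldl]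
    exact foldl_insertBy_pairwise _ _ List.Pairwise.nil
  have h2 : (mergeEvents (PySem.List.sorted (l.map Prod.fst) (fun x => x))
      (PySem.List.sorted (l.map Prod.snd) (fun x => x))).Pairwise lexle :=
    mergeEvents_pairwise _ _
      (PySem.List.sorted_pairwise (l.map Prod.fst) (fun x => x))
      (PySem.List.sorted_pairwise (l.map Prod.snd) (fun x => x))
  exact List.Perm.eq_of_pairwise (fun a b _ _ hab hba => lexle_antisymm hab hba) h1 h2 hperm

-- ===== VERDICT (by name: the statement is the Claim_ definition above) =====
theorem max_logged_in_spec : Claim_equal_max_logged_in := by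
  intro l T _
  unfold Spec_max_logged_in
  show sweepA T (PySem.List.sorted2
      (l.foldl (fun acc i => (acc ++ [(i.1, (1:Int))]) ++ [(i.2, (-1:Int))]) []) Prod.fst Prod.snd) 0 0 0 =
    mergeSweep T (PySem.List.sorted (l.map Prod.fst) (fun x => x))
      (PySem.List.sorted (l.map Prod.snd) (fun x => x)) 0 0 0
  rw [sorted2_eq_mergeEvents, mergeSweep_eq_sweepA]
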